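-- pv_equiv track=rewrite | github.com/balaprasadmb/PyGrams | original.py | orignial
-- ===== SOURCE A (Python) =====
-- def orignial(input1):
--   l = []
--   f = True
--   l.append(input1[0])
--   input1 = input1.lstrip(input1[0])
--   op_str = ''
--   for i in input1:
--     if f:
--       l.insert(0, i)
--       f = False
--     else:
--       l.append(i)
--       f = True
--     input1.lstrip(i)
--   return ''.join(l)
-- ===== SOURCE B (Python) =====
-- def orignial(input1):
--     first = input1[0]
--     rest = input1.lstrip(first)
--     evens = rest[0::2]
--     odds = rest[1::2]
--     return evens[::-1] + first + odds
-- ===== Notes on version B (the rewrite author's own statement) =====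
-- stated objective: faster
-- what changed: Replaces the mutating alternating front-insert/append loop with stride slices: split the stripped string into even- and odd-indexed chars and return evens[::-1] + first + odds.
import Mathlib
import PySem

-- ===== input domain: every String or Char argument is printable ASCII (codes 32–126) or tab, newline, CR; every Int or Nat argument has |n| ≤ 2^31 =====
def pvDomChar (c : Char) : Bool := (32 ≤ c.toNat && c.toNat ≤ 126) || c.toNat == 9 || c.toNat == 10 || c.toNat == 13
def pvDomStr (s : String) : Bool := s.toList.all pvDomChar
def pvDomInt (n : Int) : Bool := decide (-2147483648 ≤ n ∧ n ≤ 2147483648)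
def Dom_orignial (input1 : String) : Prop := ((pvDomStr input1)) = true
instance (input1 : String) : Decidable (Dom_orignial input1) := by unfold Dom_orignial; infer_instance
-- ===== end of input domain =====

-- B replaces A's mutating alternating front-insert/append loop with stride slices of the
-- stripped string: reversed even-indexed chars + first char + odd-indexed chars.

-- ===== PORT A =====
-- input1.lstrip(input1[0]) strips the one-char set {input1[0]}: exactly dropWhile (· == c).
-- (the loop body's discarded 'input1.lstrip(i)' and the unused 'op_str' in A are pure no-ops, not ported)
def orignial (input1 : String) : String :=
  match input1.toList with
  | [] => ""  -- Python raises IndexError here; excluded by Pre_orignial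
  | c :: _ =>
    let stripped := input1.toList.dropWhile (· == c)
    let res := stripped.foldl
      (fun (st : List Char × Bool) i =>
        if st.2 then (i :: st.1, false) else (st.1 ++ [i], true)) ([c], true)
    String.ofList res.1

-- ===== PORT B =====
-- rest[0::2], rest[1::2], evens[::-1] are PySem.List.slice?; step ≠ 0 so .getD [] never fires.
def orignial_alt (input1 : String) : String :=
  match input1.toList with
  | [] => ""  -- Python raises IndexError here; excluded by Pre_orignial
  | c :: _ =>
    let rest := input1.toList.dropWhile (· == c)
    let evens := (PySem.List.slice? rest (some 0) none 2).getD []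
    let odds := (PySem.List.slice? rest (some 1) none 2).getD []
    String.ofList (((PySem.List.slice? evens none none (-1)).getD []) ++ c :: odds)

-- ===== PRECONDITION & SPEC =====
-- A raises IndexError on the empty string (input1[0]); B raises there too.
def Pre_orignial (input1 : String) : Prop := input1 ≠ ""
instance (input1 : String) : Decidable (Pre_orignial input1) := by unfold Pre_orignial; infer_instance
def pvWitness_orignial : String := "aababc"

def Spec_orignial (input1 : String) (out : String) : Prop := out = orignial_alt input1
instance (input1 : String) (out : String) : Decidable (Spec_orignial input1 out) := by unfold Spec_orignial; infer_instance

-- ===== CLAIM (what is proved, stated in full; the proofs are below) =====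
def Claim_equal_orignial : Prop := ∀ (input1 : String), Dom_orignial input1 → Pre_orignial input1 → Spec_orignial input1 (orignial input1)

-- ===== LEMMAS AND PROOFS =====

-- chars at even indices of a list, by two-step structural recursion (proof-only helper)
def altEvens : List Char → List Char
  | [] => []
  | [c] => [c]
  | c :: _ :: rest => c :: altEvens rest

-- chars at odd indices (proof-only helper)
def altOdds (s : List Char) : List Char := altEvens s.tail

theorem altEvens_cons (x : Char) (xs : List Char) :
    altEvens (x :: xs) = x :: altOdds xs := by
  cases xs <;> simp [altEvens, altOdds]

theorem altOdds_cons (x : Char) (xs : List Char) :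
    altOdds (x :: xs) = altEvens xs := rfl

-- A's loop, started on (l, f = True), puts even-indexed chars reversed in front of l and
-- odd-indexed chars behind it.
theorem fold_pair (xs : List Char) :
    (∀ l : List Char,
      (xs.foldl (fun (st : List Char × Bool) i =>
        if st.2 then (i :: st.1, false) else (st.1 ++ [i], true)) (l, true)).1
        = (altEvens xs).reverse ++ l ++ altOdds xs) ∧
    (∀ l : List Char,
      (xs.foldl (fun (st : List Char × Bool) i =>
        if st.2 then (i :: st.1, false) else (st.1 ++ [i], true)) (l, false)).1
        = (altOdds xs).reverse ++ l ++ altEvens xs) := by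
  induction xs with
  | nil => simp [altEvens, altOdds]
  | cons x xs ih =>
    constructor
    · intro l
      simp only [List.foldl_cons, if_true]
      rw [(ih.2 (x :: l))]
      simp [altEvens_cons, altOdds_cons]
    · intro l
      simp only [List.foldl_cons, Bool.false_eq_true, reduceIte]
      rw [(ih.1 (l ++ [x]))]
      simp [altEvens_cons, altOdds_cons]

theorem evens_range (xs : List Char) :
    (List.range ((xs.length+1)/2)).filterMap (fun k => xs[2*k]?) = altEvens xs := by
  induction xs using altEvens.induct with
  | case1 => simp [altEvens]
  | case2 c => simp [altEvens, List.range_succ]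
  | case3 c d rest ih =>
    have hlen : ((c :: d :: rest).length + 1)/2 = ((rest.length+1)/2) + 1 := by
      simp [List.length_cons]; omega
    have hf : ((fun k => (c :: d :: rest)[2*k]?) ∘ Nat.succ) = fun k => rest[2*k]? := by
      funext k
      simp [show 2*(k+1) = 2*k+1+1 from by ring]
    rw [hlen, List.range_succ_eq_map, List.filterMap_cons, List.filterMap_map, hf, ih]
    simp [altEvens]

theorem slice?_zero_two (xs : List Char) :
    PySem.List.slice? xs (some 0) none 2 = some (altEvens xs) := by
  unfold PySem.List.slice? PySem.List.sliceIndices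
  norm_num
  have hc : (if 0 < xs.length then (((xs.length:Int) + 2 - 1) / 2).toNat else 0) = (xs.length+1)/2 := by
    split_ifs with h <;> omega
  have hf : (fun x : Nat => xs[(2*(x:Int)).toNat]?) = fun k => xs[2*k]? := by
    funext k
    rw [show (2*(k:Int)) = ((2*k : Nat) : Int) by push_cast; ring, Int.toNat_natCast]
  rw [hc, hf, evens_range]

theorem slice?_one_two (xs : List Char) :
    PySem.List.slice? xs (some 1) none 2 = some (altOdds xs) := by
  cases xs with
  | nil => rfl
  | cons c t =>
    unfold PySem.List.slice? PySem.List.sliceIndices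
    norm_num
    have hc : (if 0 < t.length then (((t.length:Int) + 2 - 1) / 2).toNat else 0) = (t.length+1)/2 := by
      split_ifs with h <;> omega
    have hf : (fun x : Nat => (c :: t)[(1 + 2*(x:Int)).toNat]?) = fun k => t[2*k]? := by
      funext k
      rw [show (1 + 2*(k:Int)) = ((2*k + 1 : Nat) : Int) by push_cast; ring, Int.toNat_natCast]
      simp
    rw [hc, hf, evens_range]
    rfl

-- ===== VERDICT (by name: the statement is the Claim_ definition above) =====
theorem orignial_spec : Claim_equal_orignial := by
  intro input1 _ _
  unfold Spec_orignial orignial orignial_alt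
  cases h : input1.toList with
  | nil => rfl
  | cons c t =>
    simp only
    rw [slice?_zero_two, slice?_one_two, PySem.List.slice?_none_none_neg_one]
    simp only [Option.getD_some]
    rw [(fold_pair (List.dropWhile (fun x => x == c) (c :: t))).1 [c]]
    simp
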